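-- pv_equiv track=rewrite | github.com/guoliangxd/interview | huawei/Python/subArray.py | isExist
-- ===== SOURCE A (Python) =====
-- def isExist(s1, s2, other, index):
--     if index == len(other):
--         if s1 == s2:
--             return True
--         else:
--             return False
--     else:
--         return isExist(s1 + other[index], s2, other, index + 1) or isExist(s1, s2 + other[index], other, index + 1)
-- ===== SOURCE B (Python) =====
-- def isExist(s1, s2, other, index):
--     # State-set DP: a state (t, d) means "the t-side string is ahead by overhang d";
--     # a branch whose two strings disagree can never end equal, so it is dropped.
--     k = 0
--     while k < len(s1) and k < len(s2) and s1[k] == s2[k]: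
--         k += 1
--     if k < len(s1) and k < len(s2):
--         return False
--     if k < len(s1):
--         state = (True, s1[k:])
--     elif k < len(s2):
--         state = (False, s2[k:])
--     else:
--         state = (True, '')
--     states = {state}
--     for i in range(index, len(other)):
--         c = other[i]
--         nxt = set()
--         for (t, d) in states:
--             if d == '':
--                 nxt.add((True, c))
--                 nxt.add((False, c))
--             else:
--                 nxt.add((t, d + c))
--                 if d[0] == c:
--                     rest = d[1:]
--                     nxt.add((True, '') if rest == '' else (t, rest))
--         states = nxt
--     return (True, '') in states
-- ===== Notes on version B (the rewrite author's own statement) =====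
-- stated objective: faster
-- what changed: A tries both placements of every character by exponential branching recursion; B runs a single left-to-right loop over a deduplicated set of (side, overhang) states with prefix pruning, then checks whether the empty overhang is reachable.
import Mathlib
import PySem

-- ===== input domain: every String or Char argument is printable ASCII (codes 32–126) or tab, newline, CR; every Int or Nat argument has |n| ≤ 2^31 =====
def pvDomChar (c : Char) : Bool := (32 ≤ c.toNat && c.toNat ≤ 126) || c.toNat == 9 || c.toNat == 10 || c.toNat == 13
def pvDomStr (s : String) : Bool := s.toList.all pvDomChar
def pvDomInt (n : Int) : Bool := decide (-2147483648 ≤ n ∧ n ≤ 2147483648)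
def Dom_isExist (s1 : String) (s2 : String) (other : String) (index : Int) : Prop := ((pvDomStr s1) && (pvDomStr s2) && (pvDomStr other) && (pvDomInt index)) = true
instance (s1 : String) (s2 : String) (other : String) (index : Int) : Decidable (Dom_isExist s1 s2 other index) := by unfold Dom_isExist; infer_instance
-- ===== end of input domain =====

-- B replaces A's try-both-sides recursion by a state-set DP over "overhang" states
-- with prefix pruning; same return value on all of Pre_.

-- ===== PORT A =====
-- A's recursion, transliterated on the character lists (other is fixed, index counts up).
def isExistGo (o : List Char) (s1 : List Char) (s2 : List Char) (index : Int) : Bool :=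
  if index = (o.length : Int) then decide (s1 = s2)
  else
    match h : PySem.List.pyGet? o index with
    | none => false   -- Python raises IndexError here (excluded by Pre_)
    | some c => isExistGo o (s1 ++ [c]) s2 (index + 1) || isExistGo o s1 (s2 ++ [c]) (index + 1)
termination_by ((o.length : Int) - index).toNat
decreasing_by
  all_goals
    have hn : ¬ (PySem.List.pyGet? o index = none) := by simp [h]
    rw [PySem.List.pyGet?_eq_none_iff] at hn
    simp only [PySem.Raise.InRange, not_and, not_lt, not_forall, not_le] at hn
    omega

def isExist (s1 : String) (s2 : String) (other : String) (index : Int) : Bool :=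
  isExistGo other.toList s1.toList s2.toList index

-- ===== PORT B =====
-- Source B's prefix-stripping while-loop, as structural recursion on the two lists.
def stripCommon : List Char → List Char → List Char × List Char
  | x :: xs, y :: ys => if x = y then stripCommon xs ys else (x :: xs, y :: ys)
  | xs, ys => (xs, ys)

-- Source B's inner loop body: the successor states a state (t, d) contributes for char c.
def stepState (c : Char) : Bool × List Char → List (Bool × List Char)
  | (_, []) => [(true, [c]), (false, [c])]
  | (t, h :: rest) =>
      (t, (h :: rest) ++ [c]) ::
        (if h = c then [if rest = [] then (true, ([] : List Char)) else (t, rest)] else [])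

-- nxt = set(); for st in states: add every successor   (Python set → PySem.Set)
def stepSet (S : PySem.Set (Bool × List Char)) (c : Char) : PySem.Set (Bool × List Char) :=
  S.foldl (fun N st => (stepState c st).foldl PySem.Set.add N) PySem.Set.empty

def isExist_alt (s1 : String) (s2 : String) (other : String) (index : Int) : Bool :=
  let o := other.toList
  match stripCommon s1.toList s2.toList with
  | (d, e) =>
    if d ≠ [] ∧ e ≠ [] then false
    else
      let st0 : Bool × List Char :=
        if d ≠ [] then (true, d) else if e ≠ [] then (false, e) else (true, [])
      let final := (PySem.List.pyRange index (o.length : Int) 1).foldl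
        (fun S i =>
          match PySem.List.pyGet? o i with
          | none => S        -- unreachable under Pre_
          | some c => stepSet S c)
        (PySem.Set.ofList [st0])
      decide ((true, ([] : List Char)) ∈ final)

-- ===== PRECONDITION & SPEC =====
-- Pre_ is exactly the inputs on which Python A returns (outside it A raises IndexError).
def Pre_isExist (s1 : String) (s2 : String) (other : String) (index : Int) : Prop :=
  -(other.toList.length : Int) ≤ index ∧ index ≤ (other.toList.length : Int)
instance (s1 : String) (s2 : String) (other : String) (index : Int) : Decidable (Pre_isExist s1 s2 other index) := by unfold Pre_isExist; infer_instance

def pvWitness_isExist : String × String × String × Int := ("ab", "a", "b", 0)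

def Spec_isExist (s1 : String) (s2 : String) (other : String) (index : Int) (out : Bool) : Prop := out = isExist_alt s1 s2 other index
instance (s1 : String) (s2 : String) (other : String) (index : Int) (out : Bool) : Decidable (Spec_isExist s1 s2 other index out) := by unfold Spec_isExist; infer_instance

-- ===== CLAIM (what is proved, stated in full; the proofs are below) =====
def Claim_equal_isExist : Prop := ∀ (s1 : String) (s2 : String) (other : String) (index : Int), Dom_isExist s1 s2 other index → Pre_isExist s1 s2 other index → Spec_isExist s1 s2 other index (isExist s1 s2 other index)

-- ===== LEMMAS AND PROOFS =====

-- unfolding equations for A's recursion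
theorem isExistGo_at_len (o a b : List Char) :
    isExistGo o a b (o.length : Int) = decide (a = b) := by
  rw [isExistGo]; simp

theorem isExistGo_none (o a b : List Char) (i : Int) (hi : i ≠ (o.length : Int))
    (hC : PySem.List.pyGet? o i = none) : isExistGo o a b i = false := by
  rw [isExistGo, if_neg hi]
  split
  · rfl
  · rename_i c heq; rw [hC] at heq; cases heq

theorem isExistGo_some (o a b : List Char) (i : Int) (c : Char) (hi : i ≠ (o.length : Int))
    (hC : PySem.List.pyGet? o i = some c) :
    isExistGo o a b i = (isExistGo o (a ++ [c]) b (i + 1) || isExistGo o a (b ++ [c]) (i + 1)) := by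
  rw [isExistGo, if_neg hi]
  split
  · rename_i heq; rw [hC] at heq; cases heq
  · rename_i c' heq; rw [hC] at heq; cases heq; rfl

theorem some_bounds (o : List Char) (i : Int) (c : Char) (hC : PySem.List.pyGet? o i = some c) :
    -(o.length : Int) ≤ i ∧ i < (o.length : Int) := by
  have hn : ¬ ¬ PySem.Raise.InRange o.length i := by
    rw [← PySem.List.pyGet?_eq_none_iff]; simp [hC]
  exact not_not.mp hn

-- The value A's recursion assigns to a state: (true, d) stands for s1 ahead by d,
-- (false, d) for s2 ahead by d.
def FF (o : List Char) (st : Bool × List Char) (i : Int) : Bool :=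
  if st.1 then isExistGo o st.2 [] i else isExistGo o [] st.2 i

-- A's result only depends on the two strings after cancelling a common prefix.
theorem isExistGo_cancel (o : List Char) : ∀ (n : Nat) (p a b : List Char) (i : Int),
    ((o.length : Int) - i).toNat ≤ n →
    isExistGo o (p ++ a) (p ++ b) i = isExistGo o a b i := by
  intro n
  induction n with
  | zero =>
    intro p a b i h
    by_cases hi : i = (o.length : Int)
    · subst hi; simp [isExistGo_at_len]
    · have hnone : PySem.List.pyGet? o i = none := by
        rw [PySem.List.pyGet?_eq_none_iff]
        simp only [PySem.Raise.InRange, not_and, not_lt]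
        omega
      rw [isExistGo_none o _ _ i hi hnone, isExistGo_none o _ _ i hi hnone]
  | succ n ih =>
    intro p a b i h
    by_cases hi : i = (o.length : Int)
    · subst hi; simp [isExistGo_at_len]
    · cases hC : PySem.List.pyGet? o i with
      | none => rw [isExistGo_none o _ _ i hi hC, isExistGo_none o _ _ i hi hC]
      | some c =>
          have hb := some_bounds o i c hC
          have h1 : ((o.length : Int) - (i + 1)).toNat ≤ n := by omega
          rw [isExistGo_some o _ _ i c hi hC, isExistGo_some o a b i c hi hC,
              show (p ++ a) ++ [c] = p ++ (a ++ [c]) by simp,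
              show (p ++ b) ++ [c] = p ++ (b ++ [c]) by simp,
              ih p (a ++ [c]) b (i + 1) h1, ih p a (b ++ [c]) (i + 1) h1]

-- Once the two strings disagree at their first characters they can never become equal.
theorem isExistGo_mismatch (o : List Char) : ∀ (n : Nat) (x y : Char) (xs ys : List Char) (i : Int),
    x ≠ y → ((o.length : Int) - i).toNat ≤ n →
    isExistGo o (x :: xs) (y :: ys) i = false := by
  intro n
  induction n with
  | zero =>
    intro x y xs ys i hxy h
    by_cases hi : i = (o.length : Int)
    · subst hi; simp [isExistGo_at_len, hxy]
    · have hnone : PySem.List.pyGet? o i = none := by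
        rw [PySem.List.pyGet?_eq_none_iff]
        simp only [PySem.Raise.InRange, not_and, not_lt]
        omega
      exact isExistGo_none o _ _ i hi hnone
  | succ n ih =>
    intro x y xs ys i hxy h
    by_cases hi : i = (o.length : Int)
    · subst hi; simp [isExistGo_at_len, hxy]
    · cases hC : PySem.List.pyGet? o i with
      | none => exact isExistGo_none o _ _ i hi hC
      | some c =>
          have hb := some_bounds o i c hC
          have h1 : ((o.length : Int) - (i + 1)).toNat ≤ n := by omega
          rw [isExistGo_some o _ _ i c hi hC]
          simp only [List.cons_append]
          rw [ih x y (xs ++ [c]) ys (i + 1) hxy h1, ih x y xs (ys ++ [c]) (i + 1) hxy h1]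
          rfl

-- One step of A's recursion, phrased on states: the value of a state at i is the
-- disjunction of the values of its successor states at i+1.
theorem FF_step (o : List Char) (i : Int) (c : Char) (hC : PySem.List.pyGet? o i = some c) :
    ∀ st : Bool × List Char, FF o st i = (stepState c st).any (fun st' => FF o st' (i + 1)) := by
  have hb := some_bounds o i c hC
  have hi : i ≠ (o.length : Int) := by omega
  rintro ⟨t, d⟩
  cases d with
  | nil =>
      cases t <;>
        · show isExistGo o _ _ i = _
          rw [isExistGo_some o _ _ i c hi hC]
          simp [FF, stepState]
  | cons h rest =>
      by_cases hc : h = c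
      · subst hc
        have hcanc : isExistGo o [h] (h :: rest) (i + 1) = isExistGo o [] rest (i + 1) := by
          have := isExistGo_cancel o ((o.length : Int) - (i+1)).toNat [h] [] rest (i + 1) (le_refl _)
          simpa using this
        have hcanc' : isExistGo o (h :: rest) [h] (i + 1) = isExistGo o rest [] (i + 1) := by
          have := isExistGo_cancel o ((o.length : Int) - (i+1)).toNat [h] rest [] (i + 1) (le_refl _)
          simpa using this
        cases t
        · -- s2 side ahead by h :: rest
          show isExistGo o [] (h :: rest) i = _
          rw [isExistGo_some o _ _ i h hi hC]
          cases rest with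
          | nil => simp [FF, stepState, hcanc, Bool.or_comm]
          | cons r rs => simp [FF, stepState, hcanc, Bool.or_comm]
        · -- s1 side ahead by h :: rest
          show isExistGo o (h :: rest) [] i = _
          rw [isExistGo_some o _ _ i h hi hC]
          cases rest with
          | nil => simp [FF, stepState, hcanc']
          | cons r rs => simp [FF, stepState, hcanc']
      · cases t
        · -- s2 ahead, head mismatch: appending to s1 gives a dead branch
          show isExistGo o [] (h :: rest) i = _
          rw [isExistGo_some o _ _ i c hi hC]
          have hdead : isExistGo o [c] (h :: rest) (i + 1) = false :=
            isExistGo_mismatch o ((o.length : Int) - (i+1)).toNat c h [] rest (i + 1)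
              (fun he => hc he.symm) (le_refl _)
          simp [FF, stepState, hdead, hc]
        · -- s1 ahead, head mismatch
          show isExistGo o (h :: rest) [] i = _
          rw [isExistGo_some o _ _ i c hi hC]
          have hdead : isExistGo o (h :: rest) [c] (i + 1) = false :=
            isExistGo_mismatch o ((o.length : Int) - (i+1)).toNat h c rest [] (i + 1) hc (le_refl _)
          simp [FF, stepState, hdead, hc]

-- membership in a fold of Set.add over a list
theorem mem_foldl_add_list (x : Bool × List Char) :
    ∀ (l : List (Bool × List Char)) (N : PySem.Set (Bool × List Char)),
      x ∈ l.foldl PySem.Set.add N ↔ x ∈ N ∨ x ∈ l := by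
  intro l
  induction l with
  | nil => simp
  | cons y ys ih =>
      intro N
      simp only [List.foldl_cons, ih, PySem.Set.mem_add, List.mem_cons]
      tauto

-- membership in the stepped set
theorem mem_stepSet (c : Char) (x : Bool × List Char) :
    ∀ (S N : List (Bool × List Char)),
      x ∈ S.foldl (fun N st => (stepState c st).foldl PySem.Set.add N) N ↔
        x ∈ N ∨ ∃ st ∈ S, x ∈ stepState c st := by
  intro S
  induction S with
  | nil => simp
  | cons st sts ih =>
      intro N
      simp only [List.foldl_cons, ih, mem_foldl_add_list, List.mem_cons]
      constructor
      · rintro ((h | h) | ⟨st', h1, h2⟩)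
        · exact Or.inl h
        · exact Or.inr ⟨st, Or.inl rfl, h⟩
        · exact Or.inr ⟨st', Or.inr h1, h2⟩
      · rintro (h | ⟨st', (rfl | h1), h2⟩)
        · exact Or.inl (Or.inl h)
        · exact Or.inl (Or.inr h2)
        · exact Or.inr ⟨st', h1, h2⟩

theorem not_falseEmpty_stepState (c : Char) (st : Bool × List Char) :
    (false, ([] : List Char)) ∉ stepState c st := by
  obtain ⟨t, d⟩ := st
  cases d with
  | nil => simp [stepState]
  | cons h rest =>
      simp only [stepState]
      intro hmem
      rcases List.mem_cons.mp hmem with h1 | h2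
      · simp at h1
      · split at h2
        · split at h2 <;> simp_all
        · simp at h2

-- the main loop invariant: membership of the empty overhang after running the loop
-- equals the disjunction of the state values before it
theorem loop_lemma (o : List Char) : ∀ (n : Nat) (i : Int) (S : List (Bool × List Char)),
    ((o.length : Int) - i).toNat = n → -(o.length : Int) ≤ i → i ≤ (o.length : Int) →
    (false, ([] : List Char)) ∉ S →
    decide ((true, ([] : List Char)) ∈
        (PySem.List.pyRange i (o.length : Int) 1).foldl
          (fun S j =>
            match PySem.List.pyGet? o j with
            | none => S
            | some c => stepSet S c) S)
      = S.any (fun st => FF o st i) := by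
  intro n
  induction n with
  | zero =>
    intro i S hn hlo hhi hno
    have hi : i = (o.length : Int) := by omega
    subst hi
    rw [PySem.List.pyRange_one_eq_nil (le_refl _)]
    simp only [List.foldl_nil]
    rw [Bool.eq_iff_iff]
    simp only [decide_eq_true_eq, List.any_eq_true]
    constructor
    · intro hmem
      exact ⟨(true, []), hmem, by simp [FF, isExistGo_at_len]⟩
    · rintro ⟨⟨t, d⟩, hmem, hF⟩
      have hd : d = [] := by
        cases t <;> simp [FF, isExistGo_at_len] at hF <;> first | exact hF | exact hF.symm
      subst hd
      cases t
      · exact absurd hmem hno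
      · exact hmem
  | succ n ih =>
    intro i S hn hlo hhi hno
    have hlt : i < (o.length : Int) := by omega
    cases hC : PySem.List.pyGet? o i with
    | none =>
        exfalso
        rw [PySem.List.pyGet?_eq_none_iff] at hC
        exact hC ⟨hlo, hlt⟩
    | some c =>
        rw [PySem.List.pyRange_one_cons hlt]
        simp only [List.foldl_cons, hC]
        have hno' : (false, ([] : List Char)) ∉ stepSet S c := by
          unfold stepSet
          rw [mem_stepSet]
          rintro (h | ⟨st, _, h2⟩)
          · simp [PySem.Set.empty] at h
          · exact not_falseEmpty_stepState c st h2
        rw [ih (i + 1) (stepSet S c) (by omega) (by omega) (by omega) hno']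
        rw [Bool.eq_iff_iff]
        simp only [List.any_eq_true]
        constructor
        · rintro ⟨st', hmem, hF⟩
          unfold stepSet at hmem
          rw [mem_stepSet] at hmem
          rcases hmem with h | ⟨st, hst, hsucc⟩
          · simp [PySem.Set.empty] at h
          · exact ⟨st, hst, by
              rw [FF_step o i c hC st]
              simp only [List.any_eq_true]
              exact ⟨st', hsucc, hF⟩⟩
        · rintro ⟨st, hst, hF⟩
          rw [FF_step o i c hC st] at hF
          simp only [List.any_eq_true] at hF
          obtain ⟨st', hsucc, hF'⟩ := hF
          refine ⟨st', ?_, hF'⟩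
          unfold stepSet
          rw [mem_stepSet]
          exact Or.inr ⟨st, hst, hsucc⟩

-- stripCommon really strips a common prefix, and what is left has differing heads
theorem stripCommon_spec : ∀ a b : List Char,
    ∃ p, a = p ++ (stripCommon a b).1 ∧ b = p ++ (stripCommon a b).2 ∧
      (∀ x xs y ys, (stripCommon a b).1 = x :: xs → (stripCommon a b).2 = y :: ys → x ≠ y) := by
  intro a
  induction a with
  | nil => intro b; exact ⟨[], by simp [stripCommon]⟩
  | cons x xs ih =>
      intro b
      cases b with
      | nil => exact ⟨[], by simp [stripCommon]⟩
      | cons y ys =>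
          by_cases hxy : x = y
          · subst hxy
            obtain ⟨p, h1, h2, h3⟩ := ih ys
            refine ⟨x :: p, ?_, ?_, ?_⟩
            · simp only [stripCommon]; simpa using h1
            · simp only [stripCommon]; simpa using h2
            · intro a1 a2 a3 a4 h5 h6
              simp only [stripCommon] at h5 h6
              exact h3 a1 a2 a3 a4 h5 h6
          · refine ⟨[], ?_, ?_, ?_⟩
            · simp [stripCommon, hxy]
            · simp [stripCommon, hxy]
            · intro a1 a2 a3 a4 h5 h6
              simp only [stripCommon, if_neg hxy] at h5 h6
              cases h5; cases h6; exact hxy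

-- ===== VERDICT (by name: the statement is the Claim_ definition above) =====
theorem isExist_spec : Claim_equal_isExist := by
  intro s1 s2 other index _ hPre
  unfold Spec_isExist isExist isExist_alt
  obtain ⟨hlo, hhi⟩ := hPre
  set a := s1.toList
  set b := s2.toList
  set o := other.toList
  obtain ⟨p, ha, hb, hmis⟩ := stripCommon_spec a b
  cases hsc : stripCommon a b with
  | mk d e =>
      rw [hsc] at ha hb hmis
      simp only at ha hb hmis
      dsimp only
      by_cases hde : d ≠ [] ∧ e ≠ []
      · rw [if_pos hde]
        obtain ⟨x, xs, rfl⟩ := List.exists_cons_of_ne_nil hde.1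
        obtain ⟨y, ys, rfl⟩ := List.exists_cons_of_ne_nil hde.2
        have hxy : x ≠ y := hmis x xs y ys rfl rfl
        rw [ha, hb, isExistGo_cancel o ((o.length : Int) - index).toNat p _ _ index (le_refl _)]
        exact isExistGo_mismatch o ((o.length : Int) - index).toNat x y xs ys index hxy (le_refl _)
      · rw [if_neg hde]
        -- the initial state and its value
        have hcanc := isExistGo_cancel o ((o.length : Int) - index).toNat p d e index (le_refl _)
        rw [ha, hb, hcanc]
        set st0 : Bool × List Char :=
          if d ≠ [] then (true, d) else if e ≠ [] then (false, e) else (true, []) with hst0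
        have hofList : PySem.Set.ofList [st0] = [st0] := by
          apply PySem.Set.ofList_eq_self_of_nodup; simp
        rw [hofList]
        have hno : (false, ([] : List Char)) ∉ [st0] := by
          rcases Decidable.em (d = []) with hd | hd
          · rcases Decidable.em (e = []) with he | he
            · simp [hst0, hd, he]
            · simp [hst0, hd, he]
          · simp [hst0, hd]
        rw [loop_lemma o ((o.length : Int) - index).toNat index [st0] rfl hlo hhi hno]
        have hFF : FF o st0 index = isExistGo o d e index := by
          rcases Decidable.em (d = []) with hd | hd
          · rcases Decidable.em (e = []) with he | he
            · subst hd; subst he; simp [hst0, FF]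
            · subst hd; simp [hst0, he, FF]
          · have he : e = [] := by
              by_contra he
              exact hde ⟨hd, he⟩
            subst he
            simp [hst0, hd, FF]
        simp [hFF]
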